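-- pv_equiv track=rewrite | github.com/Huawei/Server_Management_Plugin_Puppet | src/files/REST-Linux/scripts/set_sys_boot.py | _checkbootsequence
-- ===== SOURCE A (Python) =====
-- def _checkbootsequence(sequence):
--     '''
--     #=======================================================================
--     #   @Description:  set boot sequence
--     #   @Method:  _setbootsequence
--     #   @Param:
--     #   @Return:
--     #   @Date:
--     #=========================================================================
--     '''
--
--     if len(sequence) != 4:
--         return False
--
--     cddvd = False
--     hdd = False
--     pxe = False
--     other = False
--
--     for i in range(0, 4):
--         if sequence[i] == 'Cd':
--             cddvd = True
--         if sequence[i] == 'Hdd':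
--             hdd = True
--         if sequence[i] == 'Pxe':
--             pxe = True
--         if sequence[i] == 'Others':
--             other = True
--
--     if cddvd != True or hdd != True or pxe != True or other != True:
--         return False
--
--     return True
-- ===== SOURCE B (Python) =====
-- def _checkbootsequence(sequence):
--     return len(sequence) == 4 and sorted(sequence) == ['Cd', 'Hdd', 'Others', 'Pxe']
-- ===== Notes on version B (the rewrite author's own statement) =====
-- stated objective: simpler
-- what changed: Replaces the four boolean flags and the flag-setting loop with canonical-form comparison: sort the sequence and compare it to the sorted list of the four required boot types.
import Mathlib
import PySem

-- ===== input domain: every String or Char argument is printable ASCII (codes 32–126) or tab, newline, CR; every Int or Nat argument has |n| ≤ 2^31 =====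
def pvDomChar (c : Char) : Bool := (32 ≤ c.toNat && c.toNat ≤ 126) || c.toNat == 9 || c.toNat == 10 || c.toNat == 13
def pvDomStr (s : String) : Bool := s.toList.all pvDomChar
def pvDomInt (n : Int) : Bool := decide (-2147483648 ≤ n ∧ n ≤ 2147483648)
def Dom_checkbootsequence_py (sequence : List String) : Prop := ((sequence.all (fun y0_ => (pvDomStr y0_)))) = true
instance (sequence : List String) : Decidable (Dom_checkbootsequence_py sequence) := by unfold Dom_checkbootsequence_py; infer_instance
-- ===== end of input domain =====

-- B replaces A's four boolean flags and the flag-setting loop with canonical-form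
-- comparison: sort the sequence and compare to the sorted target list (objective: simpler).

-- ===== PORT A =====
-- Literal transliteration: length guard, four flags, loop over range(0,4)
-- (indexing sequence[i] via pyGetD, total here because the guard ensures length 4).
def checkbootsequence_py (sequence : List String) : Bool :=
  if sequence.length ≠ 4 then false
  else
    let st := (PySem.List.pyRange 0 4 1).foldl
      (fun (s : Bool × Bool × Bool × Bool) i =>
        let x := PySem.List.pyGetD sequence i ""
        (if x == "Cd" then true else s.1,
         if x == "Hdd" then true else s.2.1,
         if x == "Pxe" then true else s.2.2.1,
         if x == "Others" then true else s.2.2.2))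
      (false, false, false, false)
    if st.1 ≠ true ∨ st.2.1 ≠ true ∨ st.2.2.1 ≠ true ∨ st.2.2.2 ≠ true then false
    else true

-- ===== PORT B =====
-- Transliteration of Source B: len(sequence) == 4 and sorted(sequence) == ['Cd','Hdd','Others','Pxe']
def checkbootsequence_py_alt (sequence : List String) : Bool :=
  decide (sequence.length = 4) &&
    (PySem.List.sorted sequence (fun x => x) false == ["Cd", "Hdd", "Others", "Pxe"])

-- ===== PRECONDITION & SPEC =====
def Spec_checkbootsequence_py (sequence : List String) (out : Bool) : Prop := out = checkbootsequence_py_alt sequence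
instance (sequence : List String) (out : Bool) : Decidable (Spec_checkbootsequence_py sequence out) := by unfold Spec_checkbootsequence_py; infer_instance

-- ===== CLAIM (what is proved, stated in full; the proofs are below) =====
def Claim_equal_checkbootsequence_py : Prop := ∀ (sequence : List String), Dom_checkbootsequence_py sequence → Spec_checkbootsequence_py sequence (checkbootsequence_py sequence)

-- ===== LEMMAS AND PROOFS =====

lemma pyRange04 : PySem.List.pyRange 0 4 1 = [0, 1, 2, 3] := by decide

-- The target list is its own sorted form, so 'sorted [a,b,c,d] = target' is exactly
-- 'the input is a permutation of the target'.
lemma sortedB (a b c d : String) :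
    (PySem.List.sorted [a, b, c, d] (fun x => x) false = ["Cd", "Hdd", "Others", "Pxe"]) ↔
    List.Perm [a, b, c, d] (["Cd", "Hdd", "Others", "Pxe"] : List String) := by
  have htgt : PySem.List.sorted (["Cd", "Hdd", "Others", "Pxe"] : List String) (fun x => x) false
      = ["Cd", "Hdd", "Others", "Pxe"] :=
    by simp [PySem.List.sorted, PySem.List.insertBy]; decide
  constructor
  · intro h
    exact (PySem.List.sorted_id_eq_sorted_id_iff_perm _ _).mp (h.trans htgt.symm)
  · intro h
    exact ((PySem.List.sorted_id_eq_sorted_id_iff_perm _ _).mpr h).trans htgt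

-- pigeonhole direction: four distinct required values all occurring among four
-- elements forces the list to be a permutation of the target.
set_option maxHeartbeats 1000000 in
lemma perm_of_flags (a b c d : String)
    (hc : d = "Cd" ∨ c = "Cd" ∨ b = "Cd" ∨ a = "Cd")
    (hh : d = "Hdd" ∨ c = "Hdd" ∨ b = "Hdd" ∨ a = "Hdd")
    (hp : d = "Pxe" ∨ c = "Pxe" ∨ b = "Pxe" ∨ a = "Pxe")
    (ho : d = "Others" ∨ c = "Others" ∨ b = "Others" ∨ a = "Others") :
    List.Perm [a, b, c, d] (["Cd", "Hdd", "Others", "Pxe"] : List String) := by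
  rcases hc with rfl|rfl|rfl|rfl <;> rcases hh with h|h|h|h <;>
    rcases hp with h'|h'|h'|h' <;> rcases ho with h''|h''|h''|h'' <;>
    first
      | (exfalso; simp_all)
      | (subst_vars; decide)

-- orient "v = one of a,b,c,d" into the flag-disjunction shape
lemma rev4 {a b c d v : String} (h : v = a ∨ v = b ∨ v = c ∨ v = d) :
    d = v ∨ c = v ∨ b = v ∨ a = v := by
  rcases h with h | h | h | h
  · exact Or.inr (Or.inr (Or.inr h.symm))
  · exact Or.inr (Or.inr (Or.inl h.symm))
  · exact Or.inr (Or.inl h.symm)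
  · exact Or.inl h.symm

-- the heart of the equivalence at length 4
set_option maxHeartbeats 1000000 in
lemma key (a b c d : String) :
    checkbootsequence_py [a, b, c, d] = checkbootsequence_py_alt [a, b, c, d] := by
  rw [Bool.eq_iff_iff]
  simp only [checkbootsequence_py, checkbootsequence_py_alt, pyRange04]
  simp [PySem.List.pyGetD, PySem.List.pyGet?, PySem.List.pyIdx?, List.foldl]
  rw [sortedB]
  constructor
  · rintro ⟨hc, hh, hp, ho⟩
    exact perm_of_flags a b c d hc hh hp ho
  · intro h
    have hm : ∀ x : String, x ∈ (["Cd", "Hdd", "Others", "Pxe"] : List String) →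
        x ∈ [a, b, c, d] := fun x hx => (h.mem_iff).mpr hx
    have mc := hm "Cd" (by decide)
    have hhd := hm "Hdd" (by decide)
    have hpx := hm "Pxe" (by decide)
    have hot := hm "Others" (by decide)
    simp only [List.mem_cons, List.not_mem_nil, or_false] at mc hhd hpx hot
    exact ⟨rev4 mc, rev4 hhd, rev4 hpx, rev4 hot⟩

-- lists of the wrong length: both sides are false
lemma not4 (sequence : List String) (h : sequence.length ≠ 4) :
    checkbootsequence_py sequence = checkbootsequence_py_alt sequence := by
  simp [checkbootsequence_py, checkbootsequence_py_alt, h]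

-- ===== VERDICT (by name: the statement is the Claim_ definition above) =====
theorem checkbootsequence_py_spec : Claim_equal_checkbootsequence_py := by
  intro sequence _
  unfold Spec_checkbootsequence_py
  match sequence with
  | [] => exact not4 _ (by simp)
  | [_] => exact not4 _ (by simp)
  | [_, _] => exact not4 _ (by simp)
  | [_, _, _] => exact not4 _ (by simp)
  | [a, b, c, d] => exact key a b c d
  | _ :: _ :: _ :: _ :: _ :: _ => exact not4 _ (by simp)
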